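-- pv_equiv track=rewrite | github.com/pureslurp/DKPGA | pga_course_fit.py | clean_header_text
-- ===== SOURCE A (Python) =====
-- def clean_header_text(header_text: str) -> str:
--     """Clean and standardize header text for column names"""
--     # Convert to lowercase
--     header = header_text.lower()
--
--     # Replace special characters and spaces with underscores
--     header = (header.replace(' - ', '_')
--                    .replace(' ', '_')
--                    .replace('-', '_')
--                    .replace(':', '')
--                    .replace('(', '')
--                    .replace(')', '')
--                    .replace('%', 'pct')
--                    .replace('.', '')
--                    .replace('/', '_'))
--
--     # Remove any duplicate underscores
--     while '__' in header:
--         header = header.replace('__', '_')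
--
--     # Remove leading/trailing underscores
--     header = header.strip('_')
--
--     return header
-- ===== SOURCE B (Python) =====
-- def clean_header_text(header_text: str) -> str:
--     """Clean and standardize header text for column names"""
--     # Single pass over the lowercased text with a per-character mapping
--     pieces = []
--     for ch in header_text.lower():
--         if ch in ' -/':
--             pieces.append('_')
--         elif ch in ':().':
--             continue
--         elif ch == '%':
--             pieces.append('pct')
--         else:
--             pieces.append(ch)
--     header = ''.join(pieces)
--
--     # Remove any duplicate underscores
--     while '__' in header:
--         header = header.replace('__', '_')
--
--     # Remove leading/trailing underscores
--     return header.strip('_')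
-- ===== Notes on version B (the rewrite author's own statement) =====
-- stated objective: idiomatic
-- what changed: A rewrites the lowercased string with nine sequential whole-string replace passes; B makes a single pass over the lowercased characters applying one per-character mapping (separator characters become an underscore, punctuation is dropped, the percent sign expands to the letters pct) and joins once; both then collapse duplicate underscores and strip edge underscores.
import Mathlib
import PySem

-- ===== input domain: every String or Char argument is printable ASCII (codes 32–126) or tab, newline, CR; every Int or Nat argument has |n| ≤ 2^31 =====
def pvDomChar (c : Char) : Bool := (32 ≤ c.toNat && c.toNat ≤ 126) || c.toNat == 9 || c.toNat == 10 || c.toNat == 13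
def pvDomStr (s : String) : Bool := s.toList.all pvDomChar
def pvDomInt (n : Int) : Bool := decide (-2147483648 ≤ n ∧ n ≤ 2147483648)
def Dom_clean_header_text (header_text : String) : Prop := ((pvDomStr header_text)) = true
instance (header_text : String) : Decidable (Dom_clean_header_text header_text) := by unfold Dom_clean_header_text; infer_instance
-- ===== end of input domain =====

-- B replaces A's chain of nine sequential .replace scans by one per-character pass
-- (idiomatic single traversal); the '__'-collapse loop and the final strip are kept.

-- ===== PORT A =====
-- shared helper: Python's `while '__' in header: header = header.replace('__', '_')`
-- (both A and B contain this exact loop); the fuel argument only makes the recursion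
-- total — each iteration shortens the string, so `h.length` iterations always suffice.
def pvCollapse (fuel : Nat) (h : List Char) : List Char :=
  match fuel with
  | 0 => h
  | fuel + 1 =>
    if PySem.Chars.isIn ['_', '_'] h then
      pvCollapse fuel (PySem.Chars.replace h ['_', '_'] ['_'])
    else h

def clean_header_text (header_text : String) : String :=
  let header := PySem.Str.lower header_text
  let header := PySem.Str.replace header " - " "_"
  let header := PySem.Str.replace header " " "_"
  let header := PySem.Str.replace header "-" "_"
  let header := PySem.Str.replace header ":" ""
  let header := PySem.Str.replace header "(" ""
  let header := PySem.Str.replace header ")" ""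
  let header := PySem.Str.replace header "%" "pct"
  let header := PySem.Str.replace header "." ""
  let header := PySem.Str.replace header "/" "_"
  let header := String.ofList (pvCollapse header.toList.length header.toList)
  PySem.Str.stripChars header "_"

-- ===== PORT B =====
-- per-character mapping of Source B's single loop body
def pvCharMap (ch : Char) : List Char :=
  if ch = ' ' ∨ ch = '-' ∨ ch = '/' then ['_']
  else if ch = ':' ∨ ch = '(' ∨ ch = ')' ∨ ch = '.' then []
  else if ch = '%' then ['p', 'c', 't']
  else [ch]

def clean_header_text_alt (header_text : String) : String :=
  let pieces := (PySem.Str.lower header_text).toList.flatMap pvCharMap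
  let header := String.ofList (pvCollapse pieces.length pieces)
  PySem.Str.stripChars header "_"

-- ===== PRECONDITION & SPEC =====
def Spec_clean_header_text (header_text : String) (out : String) : Prop := out = clean_header_text_alt header_text
instance (header_text : String) (out : String) : Decidable (Spec_clean_header_text header_text out) := by unfold Spec_clean_header_text; infer_instance

-- ===== CLAIM (what is proved, stated in full; the proofs are below) =====
def Claim_equal_clean_header_text : Prop := ∀ (header_text : String), Dom_clean_header_text header_text → Spec_clean_header_text header_text (clean_header_text header_text)

-- ===== LEMMAS AND PROOFS =====

-- one pass of Python's str.replace (non-empty pattern), as a structural recursion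
def repStep (old new : List Char) : List Char → List Char
  | [] => []
  | c :: t =>
    if old.isPrefixOf (c :: t) then new ++ repStep old new (t.drop (old.length - 1))
    else c :: repStep old new t
termination_by l => l.length
decreasing_by
  · simp only [List.length_cons, List.length_drop]; omega
  · simp only [List.length_cons]; omega

theorem replace_go_eq (old new : List Char) (hold : old ≠ []) :
    ∀ fuel l acc, l.length ≤ fuel →
      PySem.Chars.replace.go old new fuel l acc = acc.reverse ++ repStep old new l := by
  intro fuel
  induction fuel with
  | zero =>
    intro l acc hl
    have : l = [] := List.eq_nil_of_length_eq_zero (Nat.le_zero.mp hl)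
    subst this
    simp [PySem.Chars.replace.go, repStep]
  | succ fuel ih =>
    intro l acc hl
    cases l with
    | nil => simp [PySem.Chars.replace.go, repStep]
    | cons c t =>
      rw [PySem.Chars.replace.go]
      by_cases hp : old.isPrefixOf (c :: t) = true
      · rw [if_pos hp]
        obtain ⟨m, hm⟩ : ∃ m, old.length = m + 1 := by
          cases old with
          | nil => exact absurd rfl hold
          | cons a b => exact ⟨b.length, rfl⟩
        have hdrop : List.drop old.length (c :: t) = t.drop (old.length - 1) := by
          rw [hm]; simp [List.drop_succ_cons]
        rw [hdrop, ih _ _ (by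
          have h1 := List.length_drop (l := t) (i := old.length - 1)
          simp only [List.length_cons] at hl
          omega)]
        simp [repStep, hp]
      · rw [if_neg hp, ih _ _ (by simpa using Nat.lt_succ_iff.mp (by simpa using hl))]
        simp [repStep, hp]

theorem replace_eq (l old new : List Char) (hold : old ≠ []) :
    PySem.Chars.replace l old new = repStep old new l := by
  unfold PySem.Chars.replace
  rw [if_neg (by simpa [List.isEmpty_iff] using hold)]
  simpa using replace_go_eq old new hold l.length l [] le_rfl

theorem repStep_single (a : Char) (r : List Char) :
    ∀ l, repStep [a] r l = l.flatMap (fun c => if c = a then r else [c]) := by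
  intro l
  induction l with
  | nil => simp [repStep]
  | cons c t ih =>
    rw [repStep]
    by_cases h : c = a
    · subst h
      simp [List.isPrefixOf, ih]
    · rw [if_neg (by simp [List.isPrefixOf, Ne.symm h])]
      simp [h, ih]

theorem flatMap_comp (l : List Char) (f g : Char → List Char) :
    (l.flatMap f).flatMap g = l.flatMap fun c => (f c).flatMap g := by
  induction l with
  | nil => rfl
  | cons c t ih => simp [List.flatMap_cons, List.flatMap_append, ih]

-- the eight single-character replaces of A compose to B's per-character map
theorem chain_eq (l : List Char) :
    repStep ['/'] ['_'] (repStep ['.'] [] (repStep ['%'] ['p','c','t'] (repStep [')'] []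
      (repStep ['('] [] (repStep [':'] [] (repStep ['-'] ['_'] (repStep [' '] ['_'] l)))))))
    = l.flatMap pvCharMap := by
  simp only [repStep_single, flatMap_comp]
  congr 1
  funext c
  by_cases h1 : c = ' '; · subst h1; decide
  by_cases h2 : c = '-'; · subst h2; decide
  by_cases h3 : c = ':'; · subst h3; decide
  by_cases h4 : c = '('; · subst h4; decide
  by_cases h5 : c = ')'; · subst h5; decide
  by_cases h6 : c = '%'; · subst h6; decide
  by_cases h7 : c = '.'; · subst h7; decide
  by_cases h8 : c = '/'; · subst h8; decide
  simp [pvCharMap, h1, h2, h3, h4, h5, h6, h7, h8]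

-- canonical form: collapse every run of underscores to a single underscore
def pvNorm : List Char → List Char
  | [] => []
  | c :: t => if c = '_' then '_' :: pvNorm (t.dropWhile (· = '_')) else c :: pvNorm t
termination_by l => l.length
decreasing_by
  · have := List.length_dropWhile_le (p := fun x => decide (x = '_')) (l := t)
    simp only [List.length_cons]; omega
  · simp only [List.length_cons]; omega

theorem pvNorm_pair (t : List Char) : pvNorm ('_' :: '_' :: t) = pvNorm ('_' :: t) := by
  rw [pvNorm, pvNorm]
  simp

theorem pvNorm_head (l : List Char) : (pvNorm l).head? = l.head? := by
  cases l with
  | nil => simp [pvNorm]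
  | cons c t =>
    rw [pvNorm]
    by_cases h : c = '_'
    · subst h; simp
    · simp [h]

theorem pvNorm_dropWhile_congr (v₁ v₂ : List Char) (h : pvNorm v₁ = pvNorm v₂) :
    pvNorm (v₁.dropWhile (· = '_')) = pvNorm (v₂.dropWhile (· = '_')) := by
  have hhead : v₁.head? = v₂.head? := by
    rw [← pvNorm_head v₁, h, pvNorm_head]
  cases v₁ with
  | nil =>
    cases v₂ with
    | nil => rfl
    | cons c t => simp at hhead
  | cons c₁ t₁ =>
    cases v₂ with
    | nil => simp at hhead
    | cons c₂ t₂ =>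
      simp at hhead
      subst hhead
      by_cases hc : c₁ = '_'
      · subst hc
        rw [pvNorm, pvNorm] at h
        simp at h
        simpa [List.dropWhile_cons] using h
      · simpa [List.dropWhile_cons, hc] using h

theorem pvNorm_append_congr :
    ∀ (n : ℕ) (u v₁ v₂ : List Char), u.length ≤ n → pvNorm v₁ = pvNorm v₂ →
      pvNorm (u ++ v₁) = pvNorm (u ++ v₂) := by
  intro n
  induction n with
  | zero =>
    intro u v₁ v₂ hu h
    have : u = [] := List.eq_nil_of_length_eq_zero (Nat.le_zero.mp hu)
    subst this; simpa using h
  | succ n ih =>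
    intro u v₁ v₂ hu h
    cases u with
    | nil => simpa using h
    | cons c u' =>
      simp only [List.cons_append]
      by_cases hc : c = '_'
      · subst hc
        rw [pvNorm, pvNorm]
        simp only [if_pos trivial]
        rw [List.dropWhile_append, List.dropWhile_append]
        by_cases he : (u'.dropWhile (· = '_')).isEmpty
        · rw [if_pos he, if_pos he]
          rw [pvNorm_dropWhile_congr _ _ h]
        · rw [if_neg he, if_neg he]
          congr 1
          have hlen : (u'.dropWhile (· = '_')).length ≤ n := by
            have h1 := List.length_dropWhile_le (p := fun x => decide (x = '_')) (l := u')
            simp only [List.length_cons] at hu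
            omega
          exact ih _ _ _ hlen h
      · rw [pvNorm, pvNorm]
        simp only [if_neg hc]
        rw [ih u' _ _ (by simp only [List.length_cons] at hu; omega) h]

theorem pvNorm_of_no_pair : ∀ l : List Char, ¬ (['_','_'] <:+: l) → pvNorm l = l := by
  intro l
  induction l with
  | nil => intro _; simp [pvNorm]
  | cons c t ih =>
    intro h
    have ht : ¬ (['_','_'] <:+: t) := fun h' => h (List.infix_cons_iff.mpr (Or.inr h'))
    by_cases hc : c = '_'
    · subst hc
      rw [pvNorm]
      simp only [if_pos trivial]
      cases t with
      | nil => simp [pvNorm]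
      | cons d t' =>
        have hd : d ≠ '_' := by
          intro hd; subst hd
          exact h (List.infix_cons_iff.mpr (Or.inl ⟨t', rfl⟩))
        rw [List.dropWhile_cons_of_neg (by simpa using hd), ih ht]
    · rw [pvNorm]
      simp only [if_neg hc]
      rw [ih ht]

theorem repStep2_len : ∀ (n : ℕ) (l : List Char), l.length ≤ n →
    (repStep ['_','_'] ['_'] l).length ≤ l.length := by
  intro n
  induction n with
  | zero =>
    intro l hl
    have : l = [] := List.eq_nil_of_length_eq_zero (Nat.le_zero.mp hl)
    subst this; simp [repStep]
  | succ n ih =>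
    intro l hl
    cases l with
    | nil => simp [repStep]
    | cons c t =>
      rw [repStep]
      by_cases hp : List.isPrefixOf ['_','_'] (c :: t) = true
      · rw [if_pos hp]
        have hd1 : (['_','_'] : List Char).length - 1 = 1 := rfl
        rw [hd1]
        have h1 := ih (t.drop 1) (by
          have := List.length_drop (l := t) (i := 1)
          simp only [List.length_cons] at hl; omega)
        have h2 := List.length_drop (l := t) (i := 1)
        simp only [List.length_append, List.length_cons, List.length_nil]
        omega
      · rw [if_neg hp]
        have := ih t (by simp only [List.length_cons] at hl; omega)
        simp only [List.length_cons]
        omega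

theorem repStep2_lt : ∀ (n : ℕ) (l : List Char), l.length ≤ n → (['_','_'] <:+: l) →
    (repStep ['_','_'] ['_'] l).length < l.length := by
  intro n
  induction n with
  | zero =>
    intro l hl hi
    have : l = [] := List.eq_nil_of_length_eq_zero (Nat.le_zero.mp hl)
    subst this
    exact absurd (List.eq_nil_of_infix_nil hi) (by simp)
  | succ n ih =>
    intro l hl hi
    cases l with
    | nil => exact absurd (List.eq_nil_of_infix_nil hi) (by simp)
    | cons c t =>
      rw [repStep]
      by_cases hp : List.isPrefixOf ['_','_'] (c :: t) = true
      · rw [if_pos hp]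
        have hd1 : (['_','_'] : List Char).length - 1 = 1 := rfl
        rw [hd1]
        have h1 := repStep2_len t.length (t.drop 1) (by
          have := List.length_drop (l := t) (i := 1); omega)
        have hp' : ['_','_'] <+: c :: t := List.isPrefixOf_iff_prefix.mp hp
        have h3 : 2 ≤ (c :: t).length := hp'.length_le
        have h2 := List.length_drop (l := t) (i := 1)
        simp only [List.length_cons, List.length_append, List.length_nil] at *
        omega
      · rw [if_neg hp]
        have hti : ['_','_'] <:+: t := by
          rcases List.infix_cons_iff.mp hi with h | h
          · exact absurd (List.isPrefixOf_iff_prefix.mpr h) hp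
          · exact h
        have := ih t (by simp only [List.length_cons] at hl; omega) hti
        simp only [List.length_cons]
        omega

theorem pvNorm_repStep2 : ∀ (n : ℕ) (l : List Char), l.length ≤ n →
    pvNorm (repStep ['_','_'] ['_'] l) = pvNorm l := by
  intro n
  induction n with
  | zero =>
    intro l hl
    have : l = [] := List.eq_nil_of_length_eq_zero (Nat.le_zero.mp hl)
    subst this; simp [repStep]
  | succ n ih =>
    intro l hl
    cases l with
    | nil => simp [repStep]
    | cons c t =>
      rw [repStep]
      by_cases hp : List.isPrefixOf ['_','_'] (c :: t) = true
      · rw [if_pos hp]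
        have hp' : ['_','_'] <+: c :: t := List.isPrefixOf_iff_prefix.mp hp
        obtain ⟨r, hr⟩ := hp'
        simp only [List.cons_append, List.nil_append, List.cons.injEq] at hr
        obtain ⟨hc, ht⟩ := hr
        subst hc
        subst ht
        have hd1 : (['_','_'] : List Char).length - 1 = 1 := rfl
        rw [hd1]
        have hdrop : ('_' :: r).drop 1 = r := by simp
        rw [hdrop]
        have hlen : r.length ≤ n := by simp only [List.length_cons] at hl; omega
        calc pvNorm (['_'] ++ repStep ['_','_'] ['_'] r)
            = pvNorm (['_'] ++ r) := pvNorm_append_congr 1 ['_'] _ _ (by simp) (ih r hlen)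
          _ = pvNorm ('_' :: '_' :: r) := (pvNorm_pair r).symm
      · rw [if_neg hp]
        have : pvNorm ([c] ++ repStep ['_','_'] ['_'] t) = pvNorm ([c] ++ t) :=
          pvNorm_append_congr 1 [c] _ _ (by simp)
            (ih t (by simp only [List.length_cons] at hl; omega))
        simpa using this

theorem pvNorm_rep3 : ∀ (n : ℕ) (l : List Char), l.length ≤ n →
    pvNorm ((repStep [' ','-',' '] ['_'] l).flatMap pvCharMap) = pvNorm (l.flatMap pvCharMap) := by
  intro n
  induction n with
  | zero =>
    intro l hl
    have : l = [] := List.eq_nil_of_length_eq_zero (Nat.le_zero.mp hl)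
    subst this; simp [repStep]
  | succ n ih =>
    intro l hl
    cases l with
    | nil => simp [repStep]
    | cons c t =>
      rw [repStep]
      by_cases hp : List.isPrefixOf [' ','-',' '] (c :: t) = true
      · rw [if_pos hp]
        have hp' : [' ','-',' '] <+: c :: t := List.isPrefixOf_iff_prefix.mp hp
        obtain ⟨r, hr⟩ := hp'
        simp only [List.cons_append, List.nil_append, List.cons.injEq] at hr
        obtain ⟨hc, ht⟩ := hr
        subst hc
        subst ht
        have hd2 : ([' ','-',' '] : List Char).length - 1 = 2 := rfl
        rw [hd2]
        have hdrop : ('-' :: ' ' :: r).drop 2 = r := by simp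
        rw [hdrop]
        have hlen : r.length ≤ n := by simp only [List.length_cons] at hl; omega
        have hmap : pvCharMap '_' = ['_'] := by decide
        calc pvNorm ((['_'] ++ repStep [' ','-',' '] ['_'] r).flatMap pvCharMap)
            = pvNorm (['_'] ++ (repStep [' ','-',' '] ['_'] r).flatMap pvCharMap) := by
              simp [hmap]
          _ = pvNorm (['_'] ++ r.flatMap pvCharMap) :=
              pvNorm_append_congr 1 ['_'] _ _ (by simp) (ih r hlen)
          _ = pvNorm ((' ' :: '-' :: ' ' :: r).flatMap pvCharMap) := by
              rw [show (' ' :: '-' :: ' ' :: r).flatMap pvCharMap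
                    = '_' :: '_' :: '_' :: r.flatMap pvCharMap by simp [pvCharMap]]
              rw [pvNorm_pair, pvNorm_pair]
              rfl
      · rw [if_neg hp]
        have : pvNorm (pvCharMap c ++ (repStep [' ','-',' '] ['_'] t).flatMap pvCharMap)
             = pvNorm (pvCharMap c ++ t.flatMap pvCharMap) :=
          pvNorm_append_congr (pvCharMap c).length _ _ _ le_rfl
            (ih t (by simp only [List.length_cons] at hl; omega))
        simpa [List.flatMap_cons] using this

theorem pvCollapse_eq_norm : ∀ (fuel : ℕ) (l : List Char), l.length ≤ fuel →
    pvCollapse fuel l = pvNorm l := by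
  intro fuel
  induction fuel with
  | zero =>
    intro l hl
    have : l = [] := List.eq_nil_of_length_eq_zero (Nat.le_zero.mp hl)
    subst this; simp [pvCollapse, pvNorm]
  | succ fuel ih =>
    intro l hl
    rw [pvCollapse]
    by_cases hin : PySem.Chars.isIn ['_','_'] l = true
    · rw [if_pos hin]
      have hinf : ['_','_'] <:+: l := (PySem.Chars.isIn_iff_infix _ _).mp hin
      rw [replace_eq _ _ _ (by simp)]
      have hlt := repStep2_lt l.length l le_rfl hinf
      rw [ih _ (by omega)]
      exact pvNorm_repStep2 l.length l le_rfl
    · rw [if_neg hin]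
      exact (pvNorm_of_no_pair l ((PySem.Chars.isIn_eq_false_iff _ _).mp (by simpa using hin))).symm

-- ===== VERDICT (by name: the statement is the Claim_ definition above) =====
theorem clean_header_text_spec : Claim_equal_clean_header_text := by
  intro s _
  show clean_header_text s = clean_header_text_alt s
  unfold clean_header_text clean_header_text_alt
  have h1 : (" - " : String).toList = [' ','-',' '] := rfl
  have h2 : (" " : String).toList = [' '] := rfl
  have h3 : ("-" : String).toList = ['-'] := rfl
  have h4 : (":" : String).toList = [':'] := rfl
  have h5 : ("(" : String).toList = ['('] := rfl
  have h6 : (")" : String).toList = [')'] := rfl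
  have h7 : ("%" : String).toList = ['%'] := rfl
  have h8 : ("pct" : String).toList = ['p','c','t'] := rfl
  have h9 : ("." : String).toList = ['.'] := rfl
  have h10 : ("/" : String).toList = ['/'] := rfl
  have h11 : ("_" : String).toList = ['_'] := rfl
  have h12 : ("" : String).toList = [] := rfl
  simp only [PySem.Str.toList_replace, h1, h2, h3, h4, h5, h6, h7, h8, h9, h10, h11, h12]
  rw [replace_eq _ _ _ (by simp), replace_eq _ _ _ (by simp), replace_eq _ _ _ (by simp),
      replace_eq _ _ _ (by simp), replace_eq _ _ _ (by simp), replace_eq _ _ _ (by simp),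
      replace_eq _ _ _ (by simp), replace_eq _ _ _ (by simp), replace_eq _ _ _ (by simp)]
  rw [chain_eq]
  rw [pvCollapse_eq_norm _ _ le_rfl, pvCollapse_eq_norm _ _ le_rfl]
  rw [pvNorm_rep3 (PySem.Str.lower s).toList.length _ le_rfl]
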